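-- pv_equiv track=rewrite | github.com/Deepakk681/kiwiq | services/kiwi_app/data_jobs/ingestion/chunking.py | _should_create_list
-- ===== SOURCE A (Python) =====
-- def _should_create_list(keys) -> bool:
--     """
--     Determine if keys represent a continuous numeric sequence that should be a list.
--
--     Args:
--         keys: Collection of keys to check
--
--     Returns:
--         True if all keys are numeric and form a continuous sequence starting from 0
--     """
--     if not keys:
--         return False
--
--     # Check if all keys are numeric
--     numeric_keys = []
--     for key in keys:
--         if not key.isdigit():
--             return False
--         numeric_keys.append(int(key))
--
--     # Check if numeric keys form a continuous sequence starting from 0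
--     numeric_keys.sort()
--     expected_sequence = list(range(len(numeric_keys)))
--
--     return numeric_keys == expected_sequence
-- ===== SOURCE B (Python) =====
-- def _should_create_list(keys) -> bool:
--     n = len(keys)
--     if n == 0:
--         return False
--
--     seen = [False] * n
--     for key in keys:
--         if not key.isdigit():
--             return False
--         v = int(key)
--         # a value out of range or repeated means the keys cannot be 0..n-1
--         if v >= n or seen[v]:
--             return False
--         seen[v] = True
--     return True
-- ===== Notes on version B (the rewrite author's own statement) =====
-- stated objective: alternative
-- what changed: Replaces collect-all-then-sort-and-compare-to-list(range(n)) with a single early-exit pass that marks each int(key) in a preallocated boolean flag array, returning False immediately on a non-digit, out-of-range or repeated value; no sort and no final sequence comparison.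
import Mathlib
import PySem

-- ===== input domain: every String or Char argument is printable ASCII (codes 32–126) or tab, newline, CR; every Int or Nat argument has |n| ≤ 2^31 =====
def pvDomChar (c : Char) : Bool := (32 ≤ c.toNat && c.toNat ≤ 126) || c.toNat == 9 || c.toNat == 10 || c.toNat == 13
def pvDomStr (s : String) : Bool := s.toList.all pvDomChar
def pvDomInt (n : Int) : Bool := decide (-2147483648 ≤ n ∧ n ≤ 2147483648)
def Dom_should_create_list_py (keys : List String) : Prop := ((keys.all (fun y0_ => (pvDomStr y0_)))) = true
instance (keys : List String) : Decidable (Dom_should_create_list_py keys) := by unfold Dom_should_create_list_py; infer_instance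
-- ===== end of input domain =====

-- B replaces A's collect-then-sort-and-compare-to-range pass with a single early-exit pass
-- that marks each parsed value in a boolean flag array — an alternative algorithm without the sort.


-- ===== PORT A =====
-- the 'for key in keys' loop building numeric_keys, with 'return False' as none
def pvA_loop (keys : List String) (numeric_keys : List Int) : Option (List Int) :=
  match keys with
  | [] => some numeric_keys
  | key :: rest =>
    if PySem.Str.strIsdigit key then
      -- int(key): isdigit guarantees int() succeeds on the ASCII domain, so getD 0 is exact here
      pvA_loop rest (numeric_keys ++ [(PySem.Int.ofStr? key).getD 0])
    else none

def should_create_list_py (keys : List String) : Bool :=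
  if keys.isEmpty then false
  else
    match pvA_loop keys [] with
    | none => false
    | some numeric_keys =>
      decide (PySem.List.sorted numeric_keys (fun x => x) false
              = PySem.List.pyRange 0 (numeric_keys.length : Int) 1)

-- ===== PORT B =====
-- the 'for key in keys' loop of Source B: parse, bounds-check, duplicate-check against the flags, mark
def pvB_mark (n : Int) (keys : List String) (seen : List Bool) : Bool :=
  match keys with
  | [] => true
  | key :: rest =>
    if PySem.Str.strIsdigit key then
      -- int(key): isdigit guarantees int() succeeds on the ASCII domain, so getD 0 is exact here
      let v : Int := (PySem.Int.ofStr? key).getD 0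
      -- seen[v] / seen[v] = True: isdigit gives 0 ≤ v and the guard gives v < n = len(seen),
      -- so plain in-range getD/set is exact for Python's indexing here
      if decide (n ≤ v) || seen.getD v.toNat false then false
      else pvB_mark n rest (seen.set v.toNat true)
    else false

def should_create_list_py_alt (keys : List String) : Bool :=
  let n : Int := keys.length
  if n == 0 then false
  else pvB_mark n keys (List.replicate n.toNat false)

-- ===== PRECONDITION & SPEC =====
def Spec_should_create_list_py (keys : List String) (out : Bool) : Prop := out = should_create_list_py_alt keys
instance (keys : List String) (out : Bool) : Decidable (Spec_should_create_list_py keys out) := by unfold Spec_should_create_list_py; infer_instance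

-- ===== CLAIM (what is proved, stated in full; the proofs are below) =====
def Claim_equal_should_create_list_py : Prop := ∀ (keys : List String), Dom_should_create_list_py keys → Spec_should_create_list_py keys (should_create_list_py keys)

-- ===== LEMMAS AND PROOFS =====

-- the common "parse all keys" skeleton both loops follow
def pvInts (keys : List String) : Option (List Int) :=
  match keys with
  | [] => some []
  | key :: rest =>
    if PySem.Str.strIsdigit key then
      (pvInts rest).map (fun l => (PySem.Int.ofStr? key).getD 0 :: l)
    else none

-- B's marking loop over the already-parsed values
def pvMark (n : Int) (ints : List Int) (seen : List Bool) : Bool :=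
  match ints with
  | [] => true
  | v :: rest =>
    if decide (n ≤ v) || seen.getD v.toNat false then false
    else pvMark n rest (seen.set v.toNat true)

theorem pvA_loop_eq (keys : List String) :
    ∀ acc, pvA_loop keys acc = (pvInts keys).map (fun l => acc ++ l) := by
  induction keys with
  | nil => intro acc; simp [pvA_loop, pvInts]
  | cons k rest ih =>
    intro acc
    simp only [pvA_loop, pvInts]
    split
    · rw [ih]
      cases pvInts rest <;> simp
    · rfl

theorem pvB_mark_eq (n : Int) (keys : List String) :
    ∀ seen, pvB_mark n keys seen
      = (match pvInts keys with
         | none => false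
         | some ints => pvMark n ints seen) := by
  induction keys with
  | nil => intro seen; simp [pvB_mark, pvInts, pvMark]
  | cons k rest ih =>
    intro seen
    simp only [pvB_mark, pvInts]
    split
    · cases h : pvInts rest with
      | none =>
        simp only [Option.map_none]
        split
        · rfl
        · rw [ih]; simp [h]
      | some ints =>
        simp only [Option.map_some, pvMark]
        split
        · rfl
        · rw [ih]; simp [h]
    · rfl

theorem pvInts_length (keys : List String) :
    ∀ l, pvInts keys = some l → l.length = keys.length := by
  induction keys with
  | nil => intro l h; simp [pvInts] at h; simp [← h]
  | cons k rest ih =>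
    intro l h
    simp only [pvInts] at h
    split at h
    · cases hr : pvInts rest with
      | none => rw [hr] at h; simp at h
      | some l' =>
        rw [hr] at h
        simp at h
        simp [← h, ih l' hr]
    · exact absurd h (by simp)

theorem pvOptNat_nonneg (X : Option Nat) :
    0 ≤ (Option.map (fun n : Int => n) (X.bind fun a => some ((a : Int)))).getD 0 := by
  cases X <;> simp

-- isdigit keys parse to nonnegative ints
theorem pvDigits_nonneg (s : String) (h : PySem.Str.strIsdigit s = true) :
    0 ≤ (PySem.Int.ofStr? s).getD 0 := by
  rw [PySem.Str.strIsdigit_eq] at h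
  simp only [PySem.Chars.strIsdigit, Bool.and_eq_true, List.all_eq_true] at h
  obtain ⟨hne', hall⟩ := h
  have hne : s.toList ≠ [] := by
    intro e; rw [e] at hne'; simp at hne'
  have hns : ∀ c ∈ s.toList, PySem.Int.isIntSpace c = false := by
    intro c hc
    have hd := hall c hc
    simp only [PySem.Chars.isdigit, Bool.and_eq_true, decide_eq_true_eq] at hd
    obtain ⟨h1, h2⟩ := hd
    simp only [PySem.Int.isIntSpace, Bool.or_eq_false_iff, decide_eq_false_iff_not]
    refine ⟨⟨⟨⟨⟨?_, ?_⟩, ?_⟩, ?_⟩, ?_⟩, ?_⟩ <;> rintro rfl <;> revert h1 h2 <;> decide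
  have hdw : ∀ l : List Char, (∀ c ∈ l, PySem.Int.isIntSpace c = false) →
      l.dropWhile PySem.Int.isIntSpace = l := by
    intro l hl
    cases l with
    | nil => rfl
    | cons a t =>
      rw [List.dropWhile_cons_of_neg]
      simp [hl a (List.mem_cons_self ..)]
  have hcs : (List.dropWhile PySem.Int.isIntSpace
      (List.dropWhile PySem.Int.isIntSpace s.toList).reverse).reverse = s.toList := by
    rw [hdw _ hns, hdw _ (by intro c hc; exact hns c (List.mem_reverse.1 hc)),
      List.reverse_reverse]
  obtain ⟨c, t, hct⟩ := List.exists_cons_of_ne_nil hne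
  have hcd : PySem.Chars.isdigit c = true := hall c (by rw [hct]; exact List.mem_cons_self ..)
  show 0 ≤ (PySem.Int.ofChars? s.toList).getD 0
  simp only [PySem.Int.ofChars?]
  rw [hcs, hct]
  split
  · rename_i ds hds
    injection hds with h1 _
    rw [h1] at hcd
    exact absurd hcd (by decide)
  · rename_i ds hds
    injection hds with h1 _
    rw [h1] at hcd
    exact absurd hcd (by decide)
  · exact pvOptNat_nonneg _

theorem pvInts_nonneg (keys : List String) :
    ∀ l, pvInts keys = some l → ∀ v ∈ l, 0 ≤ v := by
  induction keys with
  | nil => intro l h; simp [pvInts] at h; subst h; intro v hv; cases hv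
  | cons k rest ih =>
    intro l h
    simp only [pvInts] at h
    split at h
    · cases hr : pvInts rest with
      | none => rw [hr] at h; simp at h
      | some l' =>
        rw [hr] at h
        simp at h
        rename_i hd
        intro v hv
        rw [← h] at hv
        rcases List.mem_cons.1 hv with rfl | hv'
        · exact pvDigits_nonneg k hd
        · exact ih l' hr v hv'
    · exact absurd h (by simp)

-- what the marking loop decides
theorem pvMark_iff (n : Int) (ints : List Int) (hnn : ∀ v ∈ ints, 0 ≤ v) :
    ∀ seen : List Bool, seen.length = n.toNat →
      (pvMark n ints seen = true
        ↔ ints.Nodup ∧ ∀ v ∈ ints, v < n ∧ seen.getD v.toNat false = false) := by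
  induction ints with
  | nil => intro seen _; simp [pvMark]
  | cons v rest ih =>
    intro seen hsl
    have hv0 : 0 ≤ v := hnn v (List.mem_cons_self ..)
    have hnn' : ∀ w ∈ rest, 0 ≤ w := fun w hw => hnn w (List.mem_cons_of_mem _ hw)
    simp only [pvMark]
    by_cases hg : n ≤ v
    · rw [if_pos (by simp [hg])]
      constructor
      · intro h; cases h
      · rintro ⟨-, hall⟩
        exact absurd (hall v (List.mem_cons_self ..)).1 (not_lt.2 hg)
    · have hvn : v < n := lt_of_not_ge hg
      have hvlen : v.toNat < seen.length := by rw [hsl]; omega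
      by_cases hseen : seen.getD v.toNat false = true
      · rw [if_pos (by simp only [Bool.or_eq_true, decide_eq_true_eq]; exact Or.inr hseen)]
        constructor
        · intro h; cases h
        · rintro ⟨-, hall⟩
          rw [(hall v (List.mem_cons_self ..)).2] at hseen
          cases hseen
      · have hseenf : seen.getD v.toNat false = false := eq_false_of_ne_true hseen
        rw [if_neg (by simp only [Bool.or_eq_true, decide_eq_true_eq, not_or]; exact ⟨hg, hseen⟩)]
        rw [ih hnn' (seen.set v.toNat true) (by simp [hsl])]
        constructor
        · rintro ⟨hnd, hall⟩
          have hvnot : v ∉ rest := by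
            intro hmem
            have hx := (hall v hmem).2
            rw [List.getD_eq_getElem?_getD, List.getElem?_set_self (by simpa using hvlen)] at hx
            simp at hx
          refine ⟨List.nodup_cons.2 ⟨hvnot, hnd⟩, ?_⟩
          intro w hw
          rcases List.mem_cons.1 hw with rfl | hw'
          · exact ⟨hvn, hseenf⟩
          · obtain ⟨hwlt, hwseen⟩ := hall w hw'
            refine ⟨hwlt, ?_⟩
            have hwv : w ≠ v := fun e => hvnot (e ▸ hw')
            have htn : v.toNat ≠ w.toNat := by
              have := hnn' w hw'; intro e; exact hwv (by omega)
            rw [List.getD_eq_getElem?_getD, List.getElem?_set_ne htn,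
              ← List.getD_eq_getElem?_getD] at hwseen
            exact hwseen
        · rintro ⟨hnd, hall⟩
          obtain ⟨hvnot, hnd'⟩ := List.nodup_cons.1 hnd
          refine ⟨hnd', ?_⟩
          intro w hw'
          obtain ⟨hwlt, hwseen⟩ := hall w (List.mem_cons_of_mem _ hw')
          refine ⟨hwlt, ?_⟩
          have hwv : w ≠ v := fun e => hvnot (e ▸ hw')
          have htn : v.toNat ≠ w.toNat := by
            have := hnn' w hw'; intro e; exact hwv (by omega)
          rw [List.getD_eq_getElem?_getD, List.getElem?_set_ne htn,
            ← List.getD_eq_getElem?_getD]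
          exact hwseen

-- sorted(xs) == list(range(len(xs))) iff xs is nodup with values below len(xs) (given xs ≥ 0)
theorem pvSorted_range_iff (xs : List Int) (hnn : ∀ v ∈ xs, 0 ≤ v) :
    (PySem.List.sorted xs (fun x => x) false
        = PySem.List.pyRange 0 (xs.length : Int) 1)
      ↔ xs.Nodup ∧ ∀ v ∈ xs, v < (xs.length : Int) := by
  constructor
  · intro h
    have hp : xs.Perm (PySem.List.pyRange 0 (xs.length : Int) 1) :=
      (PySem.List.sorted_perm xs (fun x => x) false).symm.trans (by rw [h])
    refine ⟨hp.nodup_iff.2 (PySem.List.nodup_pyRange_one 0 (xs.length : Int)), ?_⟩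
    intro v hv
    have := hp.subset hv
    rw [PySem.List.mem_pyRange_one] at this
    exact this.2
  · rintro ⟨hnd, hlt⟩
    have hsub : xs ⊆ PySem.List.pyRange 0 (xs.length : Int) 1 := by
      intro v hv
      rw [PySem.List.mem_pyRange_one]
      exact ⟨hnn v hv, hlt v hv⟩
    have hsp : xs.Subperm (PySem.List.pyRange 0 (xs.length : Int) 1) := hnd.subperm hsub
    have hlen : (PySem.List.pyRange 0 (xs.length : Int) 1).length ≤ xs.length := by
      rw [PySem.List.length_pyRange_one]; omega
    have hperm : (PySem.List.pyRange 0 (xs.length : Int) 1).Perm xs :=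
      (hsp.perm_of_length_le hlen).symm
    exact PySem.List.sorted_eq_of_perm_of_pairwise_lt _ _ _ hperm
      (PySem.List.pairwise_lt_pyRange_one 0 (xs.length : Int))

-- ===== VERDICT (by name: the statement is the Claim_ definition above) =====
theorem should_create_list_py_spec : Claim_equal_should_create_list_py := by
  intro keys _
  unfold Spec_should_create_list_py should_create_list_py should_create_list_py_alt
  by_cases hne : keys.isEmpty
  · simp [List.isEmpty_iff.1 hne]
  · have hlen0 : keys.length ≠ 0 := by
      simpa [List.isEmpty_iff, List.length_eq_zero_iff] using hne
    simp only [hne, if_neg, Bool.false_eq_true, not_false_iff]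
    rw [pvA_loop_eq, pvB_mark_eq]
    cases hI : pvInts keys with
    | none => simp [hlen0]
    | some ints =>
      have hL := pvInts_length keys ints hI
      have hnn := pvInts_nonneg keys ints hI
      simp only [Option.map_some, List.nil_append]
      have hn0 : ((keys.length : Int) == 0) = false := by
        simp [hlen0]
      simp only [hn0, Bool.false_eq_true, if_neg, not_false_iff]
      have hmark := pvMark_iff (keys.length : Int) ints hnn
        (List.replicate (Int.toNat (keys.length : Int)) false) (by simp)
      have hrepl : ∀ v ∈ ints, (List.replicate (Int.toNat (keys.length : Int)) false).getD v.toNat false = false := by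
        intro v _
        simp [List.getD_eq_getElem?_getD, List.getElem?_replicate]
        split <;> rfl
      have hiff : (pvMark (keys.length : Int) ints (List.replicate (Int.toNat (keys.length : Int)) false) = true)
          ↔ (PySem.List.sorted ints (fun x => x) false
              = PySem.List.pyRange 0 (ints.length : Int) 1) := by
        rw [hmark, pvSorted_range_iff ints hnn, hL]
        constructor
        · rintro ⟨hnd, h⟩; exact ⟨hnd, fun v hv => (h v hv).1⟩
        · rintro ⟨hnd, h⟩; exact ⟨hnd, fun v hv => ⟨h v hv, hrepl v hv⟩⟩
      simp only [Int.toNat_natCast] at hiff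
      by_cases hs : PySem.List.sorted ints (fun x => x) false
          = PySem.List.pyRange 0 (ints.length : Int) 1
      · simp only [hs, decide_true]
        exact (hiff.2 hs).symm
      · simp only [hs, decide_false]
        exact (Bool.eq_false_iff.2 fun hc => hs (hiff.1 hc)).symm
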